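-- pv_equiv track=rewrite | github.com/ywlee-dot/unified | backend/app/projects/dataset_summary/core.py | _cell_length_stats
-- ===== SOURCE A (Python) =====
-- def _cell_length_stats(row: tuple) -> tuple[int, int, int]:
--     lengths = []
--     for cell in row:
--         if cell is None:
--             continue
--         text = str(cell).strip()
--         if not text:
--             continue
--         lengths.append(len(text))
--     if not lengths:
--         return 0, 0, 0
--     short = sum(1 for length in lengths if length <= 12)
--     long = sum(1 for length in lengths if length >= 30)
--     return short, long, max(lengths)
-- ===== SOURCE B (Python) =====
-- def _cell_length_stats(row: tuple) -> tuple[int, int, int]: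
--     short = 0
--     long = 0
--     max_len = 0
--     for cell in row:
--         if cell is None:
--             continue
--         text = str(cell).strip()
--         if not text:
--             continue
--         n = len(text)
--         if n <= 12:
--             short += 1
--         if n >= 30:
--             long += 1
--         if n > max_len:
--             max_len = n
--     return short, long, max_len
-- ===== Notes on version B (the rewrite author's own statement) =====
-- stated objective: simpler
-- what changed: Replaces A's build-a-lengths-list-then-three-separate-scans (two generator sums and a max) with one single pass over the row maintaining three counters directly; no intermediate list and no empty-list special case.
import Mathlib
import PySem

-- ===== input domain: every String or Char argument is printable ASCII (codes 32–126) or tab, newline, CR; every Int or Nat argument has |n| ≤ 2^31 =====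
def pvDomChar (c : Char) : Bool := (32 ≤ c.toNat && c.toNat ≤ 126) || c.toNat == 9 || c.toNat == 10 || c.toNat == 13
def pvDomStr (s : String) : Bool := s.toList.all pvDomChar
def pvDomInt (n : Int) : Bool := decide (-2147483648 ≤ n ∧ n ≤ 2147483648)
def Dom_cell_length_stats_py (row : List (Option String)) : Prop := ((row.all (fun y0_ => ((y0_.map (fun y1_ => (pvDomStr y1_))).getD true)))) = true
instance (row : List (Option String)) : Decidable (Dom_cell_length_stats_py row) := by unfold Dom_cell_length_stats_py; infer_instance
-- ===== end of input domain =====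

-- B replaces A's build-list-then-three-scans with a single pass keeping three counters (objective: simpler).

-- ===== PORT A =====
def cell_length_stats_py (row : List (Option String)) : Int × Int × Int :=
  let lengths : List Int := row.foldl (fun lengths cell =>
    match cell with
    | none => lengths
    | some c =>
      let text := PySem.Str.strip c
      if text.toList = [] then lengths
      else lengths ++ [PySem.Str.len text]) []
  if lengths = [] then (0, 0, 0)
  else
    let short : Int := ((lengths.filter (fun l => l ≤ 12)).length : Int)
    let long : Int := ((lengths.filter (fun l => l ≥ 30)).length : Int)
    (short, long, (PySem.List.max? lengths (fun y => y)).getD 0)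

-- ===== PORT B =====
def cell_length_stats_py_alt (row : List (Option String)) : Int × Int × Int :=
  row.foldl (fun acc cell =>
    match cell with
    | none => acc
    | some c =>
      let text := PySem.Str.strip c
      if text.toList = [] then acc
      else
        let n := PySem.Str.len text
        (acc.1 + (if n ≤ 12 then 1 else 0),
         acc.2.1 + (if n ≥ 30 then 1 else 0),
         max acc.2.2 n)) (0, 0, 0)

-- ===== PRECONDITION & SPEC =====
def Spec_cell_length_stats_py (row : List (Option String)) (out : Int × Int × Int) : Prop := out = cell_length_stats_py_alt row
instance (row : List (Option String)) (out : Int × Int × Int) : Decidable (Spec_cell_length_stats_py row out) := by unfold Spec_cell_length_stats_py; infer_instance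

-- ===== CLAIM (what is proved, stated in full; the proofs are below) =====
def Claim_equal_cell_length_stats_py : Prop := ∀ (row : List (Option String)), Dom_cell_length_stats_py row → Spec_cell_length_stats_py row (cell_length_stats_py row)

-- ===== LEMMAS AND PROOFS =====

/-- the kept lengths of one cell -/
def pvKept (cell : Option String) : List Int :=
  match cell with
  | none => []
  | some c =>
    let text := PySem.Str.strip c
    if text.toList = [] then [] else [PySem.Str.len text]

lemma a_lengths (row : List (Option String)) (acc : List Int) :
    row.foldl (fun lengths cell =>
      match cell with
      | none => lengths
      | some c =>
        let text := PySem.Str.strip c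
        if text.toList = [] then lengths
        else lengths ++ [PySem.Str.len text]) acc = acc ++ row.flatMap pvKept := by
  induction row generalizing acc with
  | nil => simp
  | cons h t ih =>
    rw [List.foldl_cons, ih, List.flatMap_cons, ← List.append_assoc]
    congr 1
    cases h with
    | none => simp [pvKept]
    | some c =>
      unfold pvKept
      dsimp only
      split_ifs <;> simp

def pvStep (acc : Int × Int × Int) (n : Int) : Int × Int × Int :=
  (acc.1 + (if n ≤ 12 then 1 else 0), acc.2.1 + (if n ≥ 30 then 1 else 0), max acc.2.2 n)

lemma b_fold (row : List (Option String)) (acc : Int × Int × Int) :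
    row.foldl (fun acc cell =>
      match cell with
      | none => acc
      | some c =>
        let text := PySem.Str.strip c
        if text.toList = [] then acc
        else
          let n := PySem.Str.len text
          (acc.1 + (if n ≤ 12 then 1 else 0),
           acc.2.1 + (if n ≥ 30 then 1 else 0),
           max acc.2.2 n)) acc = (row.flatMap pvKept).foldl pvStep acc := by
  induction row generalizing acc with
  | nil => simp
  | cons h t ih =>
    rw [List.foldl_cons, ih, List.flatMap_cons, List.foldl_append]
    congr 1
    cases h with
    | none => simp [pvKept]
    | some c =>
      unfold pvKept pvStep
      dsimp only
      split_ifs <;> simp_all [PySem.Str.len_eq]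

lemma int_fold (ns : List Int) (s l m : Int) :
    ns.foldl pvStep (s, l, m) =
      (s + ((ns.filter (fun n => n ≤ 12)).length : Int),
       l + ((ns.filter (fun n => n ≥ 30)).length : Int),
       ns.foldl max m) := by
  induction ns generalizing s l m with
  | nil => simp
  | cons h t ih =>
    simp only [List.foldl_cons, List.filter_cons, pvStep, ih]
    split_ifs <;> simp_all [Prod.ext_iff] <;> omega

lemma kept_pos (cell : Option String) (n : Int) (h : n ∈ pvKept cell) : 1 ≤ n := by
  unfold pvKept at h
  cases cell with
  | none => simp at h
  | some c =>
    by_cases hc : PySem.Chars.strip c.toList = []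
    · simp [hc] at h
    · simp [hc] at h
      subst h
      have : (PySem.Chars.strip c.toList).length ≠ 0 := by simpa using hc
      omega

-- ===== VERDICT (by name: the statement is the Claim_ definition above) =====
theorem cell_length_stats_py_spec : Claim_equal_cell_length_stats_py := by
  intro row _
  unfold Spec_cell_length_stats_py cell_length_stats_py cell_length_stats_py_alt
  rw [a_lengths, b_fold]
  simp only [List.nil_append]
  cases hL : row.flatMap pvKept with
  | nil => simp
  | cons x t =>
    have hxmem : x ∈ row.flatMap pvKept := by rw [hL]; exact List.mem_cons_self
    obtain ⟨c, -, hc⟩ := List.mem_flatMap.mp hxmem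
    have hx : 1 ≤ x := kept_pos c x hc
    have hmax : max (0 : Int) x = x := by omega
    rw [int_fold]
    simp [PySem.List.max?_id_cons, hmax]
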